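-- pv_equiv track=rewrite | github.com/AromalDileep/DSA | 2406-decode-the-message/decode-the-message.py | decodeMessage
-- ===== SOURCE A (Python) =====
-- def decodeMessage(key: str, message: str) -> str:
--     u_key = ""
--     seen = set()
--     for i in range(len(key)):
--         if key[i] in seen or key[i] == " ":
--             continue
--         u_key += key[i]
--         seen.add(key[i])
--
--     i_key = {u_key[i] : i+1 for i in range(len(u_key)) }
--
--     alphas = { i+1 : chr(ord('a') + i) for i in range(26)}
--     res = ""
--
--     for ch in message:
--         if ch == " ":
--             res += " "
--         else:
--             res += alphas[i_key[ch]]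
--     return res
-- ===== SOURCE B (Python) =====
-- def decodeMessage(key: str, message: str) -> str:
--     # No substitution table: each message character is decoded on the spot by
--     # locating its first occurrence in key and counting the distinct non-space
--     # characters that precede it (= its rank in first-occurrence order).
--     def letter(ch):
--         i = key.index(ch)
--         return chr(ord('a') + len({c for c in key[:i] if c != ' '}))
--     return ''.join(' ' if ch == ' ' else letter(ch) for ch in message)
-- ===== Notes on version B (the rewrite author's own statement) =====
-- stated objective: alternative
-- what changed: B builds no substitution table at all: instead of A's dedup pass plus two chained dicts, it decodes each message character on the fly by locating its first occurrence in key (str.index) and counting the distinct non-space characters before that position.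
import Mathlib
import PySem

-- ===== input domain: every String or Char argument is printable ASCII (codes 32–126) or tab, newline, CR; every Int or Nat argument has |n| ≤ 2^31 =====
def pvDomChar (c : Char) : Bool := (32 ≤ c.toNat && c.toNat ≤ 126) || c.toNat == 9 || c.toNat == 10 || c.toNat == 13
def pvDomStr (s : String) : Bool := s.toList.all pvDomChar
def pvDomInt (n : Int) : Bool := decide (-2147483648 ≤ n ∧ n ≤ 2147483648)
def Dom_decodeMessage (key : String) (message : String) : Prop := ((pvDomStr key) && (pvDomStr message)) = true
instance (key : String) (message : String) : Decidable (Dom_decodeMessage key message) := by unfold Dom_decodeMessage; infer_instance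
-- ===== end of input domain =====

-- B builds no substitution table: it decodes each message character by a direct search in
-- key (first occurrence + count of distinct preceding non-space chars); objective: alternative.


-- ===== PORT A =====
def decodeMessage (key : String) (message : String) : String :=
  -- u_key = ""; seen = set(); for i in range(len(key)): …
  let kl := key.toList
  let st : List Char × PySem.Set Char :=
    (PySem.List.pyRange 0 (PySem.Str.len key) 1).foldl
      (fun st i =>
        if PySem.Set.contains st.2 (PySem.List.pyGetD kl i ' ') || PySem.List.pyGetD kl i ' ' == ' ' then st
        else (st.1 ++ [PySem.List.pyGetD kl i ' '], PySem.Set.add st.2 (PySem.List.pyGetD kl i ' ')))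
      ([], PySem.Set.empty)
  let uKey := st.1
  -- i_key = {u_key[i] : i+1 for i in range(len(u_key))}
  let iKey : PySem.Dict Char Int :=
    (PySem.List.pyRange 0 (uKey.length : Int) 1).foldl
      (fun d i => d.insert (PySem.List.pyGetD uKey i ' ') (i + 1)) PySem.Dict.empty
  -- alphas = {i+1 : chr(ord('a') + i) for i in range(26)}
  let alphas : PySem.Dict Int Char :=
    (PySem.List.pyRange 0 26 1).foldl
      (fun d i => d.insert (i + 1) (Char.ofNat ('a'.toNat + i.toNat))) PySem.Dict.empty
  -- res = ""; for ch in message: …  (Python raises KeyError on a missing dict key; Pre_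
  -- excludes exactly those inputs, so getD's default is never the value claimed about)
  let res : List Char :=
    message.toList.foldl
      (fun res ch =>
        if ch == ' ' then res ++ [' ']
        else res ++ [alphas.getD (iKey.getD ch 0) '?'])
      []
  String.ofList res

-- ===== PORT B =====
def decodeMessage_alt (key : String) (message : String) : String :=
  -- def letter(ch): i = key.index(ch); return chr(ord('a') + len({c for c in key[:i] if c != ' '}))
  -- (key.index raises ValueError on a char absent from key; Pre_ excludes exactly those
  --  inputs, so index?'s getD default is never the value claimed about)
  let kl := key.toList
  let letter := fun (ch : Char) =>
    let i : Nat := (PySem.List.index? kl ch).getD 0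
    Char.ofNat ('a'.toNat +
      (PySem.Set.ofList ((PySem.List.slice kl none (some (i : Int))).filter (fun c => c ≠ ' '))).length)
  -- ''.join(' ' if ch == ' ' else letter(ch) for ch in message)
  String.ofList (message.toList.map (fun ch => if ch == ' ' then ' ' else letter ch))

-- ===== PRECONDITION & SPEC =====
-- the first-occurrence list of the distinct non-space characters of a list
def pvUniq (l : List Char) : List Char := PySem.List.dedup (l.filter (fun x => x ≠ ' '))

-- Pre_ excludes exactly the inputs on which A raises KeyError (B raises there too, a
-- ValueError, or its count may run past 'z'): a non-space message character that is not
-- among the first 26 distinct non-space characters of key.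
def Pre_decodeMessage (key : String) (message : String) : Prop :=
  (message.toList.all (fun c => c == ' ' || c ∈ (pvUniq key.toList).take 26)) = true
instance (key : String) (message : String) : Decidable (Pre_decodeMessage key message) := by
  unfold Pre_decodeMessage; infer_instance

def pvWitness_decodeMessage : String × String := ("the quick fox", "cheek   hut")

def Spec_decodeMessage (key : String) (message : String) (out : String) : Prop := out = decodeMessage_alt key message
instance (key : String) (message : String) (out : String) : Decidable (Spec_decodeMessage key message out) := by unfold Spec_decodeMessage; infer_instance

-- ===== CLAIM (what is proved, stated in full; the proofs are below) =====
def Claim_equal_decodeMessage : Prop := ∀ (key : String) (message : String), Dom_decodeMessage key message → Pre_decodeMessage key message → Spec_decodeMessage key message (decodeMessage key message)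

-- ===== LEMMAS AND PROOFS =====

lemma pvUniq_nodup (l : List Char) : (pvUniq l).Nodup := by
  unfold pvUniq
  rw [PySem.List.dedup_eq_ofList]
  exact PySem.Set.nodup_ofList _

def pvLoop : List Char → List Char → List Char
  | [], s => s
  | c :: t, s => if c ∈ s ∨ c = ' ' then pvLoop t s else pvLoop t (s ++ [c])

lemma pvLoop_eq (l : List Char) : ∀ s : List Char,
    pvLoop l s = PySem.Set.update s (l.filter (fun x => x ≠ ' ')) := by
  induction l with
  | nil => intro s; simp [pvLoop, PySem.Set.update]
  | cons c t ih =>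
      intro s
      by_cases hsp : c = ' '
      · subst hsp
        rw [pvLoop, if_pos (Or.inr rfl)]
        simpa using ih s
      · rw [List.filter_cons, if_pos (by simp [hsp]), PySem.Set.update_cons]
        by_cases hs : c ∈ s
        · rw [pvLoop, if_pos (Or.inl hs), PySem.Set.add_of_mem hs]
          exact ih s
        · rw [pvLoop, if_neg (by tauto), PySem.Set.add_of_not_mem hs]
          exact ih (s ++ [c])

lemma pvLoop_nil_eq (l : List Char) : pvLoop l [] = pvUniq l := by
  rw [pvLoop_eq, pvUniq, PySem.List.dedup_eq_ofList, PySem.Set.update_nil_left]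

lemma foldA (l : List Char) : ∀ s : List Char,
    (l.foldl (fun (st : List Char × PySem.Set Char) c =>
       if PySem.Set.contains st.2 c || c == ' ' then st
       else (st.1 ++ [c], PySem.Set.add st.2 c)) (s, s))
    = (pvLoop l s, pvLoop l s) := by
  induction l with
  | nil => intro s; simp [pvLoop]
  | cons c t ih =>
      intro s
      rw [List.foldl_cons]
      by_cases h : c ∈ s ∨ c = ' '
      · have hb : (PySem.Set.contains s c || c == ' ') = true := by
          rcases h with h | h <;> simp [PySem.Set.contains_eq_listContains, h]
        rw [pvLoop]
        simp only [hb, if_true, if_pos h]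
        exact ih s
      · push Not at h
        have hb : (PySem.Set.contains s c || c == ' ') = false := by
          simp [PySem.Set.contains_eq_listContains, h.1, h.2]
        rw [pvLoop]
        simp only [hb, Bool.false_eq_true, if_false]
        rw [if_neg (by tauto), PySem.Set.add_of_not_mem h.1]
        exact ih (s ++ [c])

lemma A_ukey (key : String) :
    ((PySem.List.pyRange 0 (PySem.Str.len key) 1).foldl
      (fun (st : List Char × PySem.Set Char) i =>
        let c := PySem.List.pyGetD key.toList i ' '
        if PySem.Set.contains st.2 c || c == ' ' then st
        else (st.1 ++ [c], PySem.Set.add st.2 c))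
      ([], PySem.Set.empty))
    = (pvUniq key.toList, pvUniq key.toList) := by
  simp only [PySem.Str.len_eq]
  rw [PySem.List.foldl_pyRange_zero_pyGetD' key.toList ' '
    (fun (st : List Char × PySem.Set Char) c =>
      if PySem.Set.contains st.2 c || c == ' ' then st
      else (st.1 ++ [c], PySem.Set.add st.2 c)) ([], PySem.Set.empty)]
  have h2 := foldA key.toList []
  rw [pvLoop_nil_eq] at h2
  simpa [PySem.Set.empty] using h2

lemma iKey_getD (u : List Char) (hu : u.Nodup) (j : Nat) (hj : j < u.length) :
    (((PySem.List.pyRange 0 (u.length : Int) 1).foldl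
        (fun (d : PySem.Dict Char Int) i => d.insert (PySem.List.pyGetD u i ' ') (i + 1))
        PySem.Dict.empty).getD u[j] 0) = (j : Int) + 1 := by
  have hmap : (PySem.List.pyRange 0 (u.length : Int) 1).map (fun i => PySem.List.pyGetD u i ' ') = u :=
    PySem.List.map_pyGetD_pyRange_zero u ' '
  have hitems := PySem.Dict.items_foldl_insert_fresh
    (PySem.List.pyRange 0 (u.length : Int) 1)
    (fun i => PySem.List.pyGetD u i ' ') (fun i => i + 1) PySem.Dict.empty
    (by intro a _; simp)
    (by rw [hmap]; exact hu)
  have hkeys := PySem.Dict.nodup_keys_foldl_insert_key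
    (PySem.List.pyRange 0 (u.length : Int) 1)
    (fun i => PySem.List.pyGetD u i ' ') (fun _ i => i + 1) PySem.Dict.empty (by simp)
  refine PySem.Dict.getD_of_mem_items _ ?_ hkeys 0
  rw [hitems]
  refine List.mem_append_right _ (List.mem_map.mpr ⟨(j : Int), ?_, ?_⟩)
  · rw [PySem.List.mem_pyRange_one]; constructor <;> [positivity; exact_mod_cast hj]
  · show (PySem.List.pyGetD u ((j : Int)) ' ', ((j : Int) + 1)) = _
    rw [PySem.List.pyGetD_natCast, List.getD_eq_getElem _ _ hj]

lemma alphas_getD (j : Nat) (hj : j < 26) :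
    (((PySem.List.pyRange 0 26 1).foldl
        (fun (d : PySem.Dict Int Char) i => d.insert (i + 1) (Char.ofNat ('a'.toNat + i.toNat)))
        PySem.Dict.empty).getD ((j : Int) + 1) '?') = Char.ofNat (97 + j) := by
  have hitems := PySem.Dict.items_foldl_insert_fresh
    (PySem.List.pyRange 0 26 1)
    (fun i => i + 1) (fun i => Char.ofNat ('a'.toNat + i.toNat)) PySem.Dict.empty
    (by intro a _; simp)
    (by
      refine (List.nodup_map_iff_inj_on (PySem.List.nodup_pyRange_one 0 26)).mpr ?_
      intro a _ b _ h; omega)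
  have hkeys := PySem.Dict.nodup_keys_foldl_insert_key
    (PySem.List.pyRange 0 26 1)
    (fun i => i + 1) (fun _ i => Char.ofNat ('a'.toNat + i.toNat)) PySem.Dict.empty (by simp)
  refine PySem.Dict.getD_of_mem_items _ ?_ hkeys '?'
  rw [hitems]
  refine List.mem_append_right _ (List.mem_map.mpr ⟨(j : Int), ?_, ?_⟩)
  · rw [PySem.List.mem_pyRange_one]; constructor <;> [positivity; exact_mod_cast hj]
  · show ((j : Int) + 1, Char.ofNat ('a'.toNat + ((j : Int)).toNat)) = _
    simp

-- B's count of distinct non-space chars before the first occurrence of c is c's rank in pvUniq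
lemma rank_eq (kl : List Char) (c : Char) (hc : c ≠ ' ')
    (j : Nat) (hj : j < (pvUniq kl).length) (hcj : (pvUniq kl)[j] = c) :
    ∃ i : Nat, PySem.List.index? kl c = some i ∧
      (PySem.Set.ofList ((kl.take i).filter (fun x => x ≠ ' '))).length = j := by
  have hcmem : c ∈ kl := by
    have : c ∈ pvUniq kl := hcj ▸ List.getElem_mem hj
    unfold pvUniq at this
    rw [PySem.List.dedup_eq_ofList, PySem.Set.mem_ofList] at this
    exact List.mem_of_mem_filter this
  obtain ⟨i, hi⟩ := Option.isSome_iff_exists.mp ((PySem.List.index?_isSome_iff kl c).mpr hcmem)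
  obtain ⟨pre, suf, hdec, hlen, hcpre⟩ := (PySem.List.index?_eq_some_iff kl c i).mp hi
  refine ⟨i, hi, ?_⟩
  have htake : kl.take i = pre := by
    rw [hdec, ← hlen, List.take_left]
  have hcP : c ∉ PySem.Set.ofList (pre.filter (fun x => x ≠ ' ')) := by
    rw [PySem.Set.mem_ofList]
    exact fun h => hcpre (List.mem_of_mem_filter h)
  set P : List Char := PySem.Set.ofList (pre.filter (fun x => x ≠ ' ')) with hP
  have hu : ∃ rest : List Char, pvUniq kl = P ++ c :: rest := by
    unfold pvUniq
    rw [hdec, List.filter_append, List.filter_cons, if_pos (by simp [hc]),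
      PySem.List.dedup_eq_ofList, PySem.Set.ofList_append, PySem.Set.update_cons,
      PySem.Set.add_of_not_mem hcP, PySem.Set.update_eq_append_filter]
    exact ⟨_, by rw [List.append_assoc, List.singleton_append]⟩
  obtain ⟨rest, hu⟩ := hu
  have hjP : j = P.length := by
    have hnd := pvUniq_nodup kl
    have hPl : P.length < (pvUniq kl).length := by rw [hu]; simp
    have hPc : (pvUniq kl)[P.length]'hPl = c := by
      have h9 : (pvUniq kl)[P.length]? = some c := by
        rw [hu, List.getElem?_append_right (le_refl P.length)]
        simp
      rwa [List.getElem?_eq_getElem hPl, Option.some_inj] at h9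
    have := hnd.getElem_inj_iff.mp (hcj.trans hPc.symm)
    omega
  rw [htake, ← hP, hjP]

lemma res_map (ml : List Char) (f : Char → Char) :
    ml.foldl (fun res ch => if ch == ' ' then res ++ [' '] else res ++ [f ch]) []
    = ml.map (fun ch => if ch == ' ' then ' ' else f ch) := by
  have h := PySem.List.foldl_append_singleton_eq_map
    (l := ml) (f := fun ch => if ch == ' ' then ' ' else f ch) (acc := ([] : List Char))
  simp only [List.nil_append] at h
  rw [← h]
  apply PySem.List.foldl_congr_mem
  intro acc x _
  by_cases hx : x = ' ' <;> simp [hx]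

-- ===== VERDICT (by name: the statement is the Claim_ definition above) =====
theorem decodeMessage_spec : Claim_equal_decodeMessage := by
  intro key message hdom hpre
  rw [Pre_decodeMessage, List.all_eq_true] at hpre
  show decodeMessage key message = decodeMessage_alt key message
  unfold decodeMessage decodeMessage_alt
  simp only [A_ukey]
  rw [res_map]
  congr 1
  apply List.map_congr_left
  intro c hcm
  by_cases hsp : c = ' '
  · simp [hsp]
  · have hmem : c ∈ (pvUniq key.toList).take 26 := by
      rcases Bool.or_eq_true_iff.mp (hpre c hcm) with h | h
      · exact absurd (beq_iff_eq.mp h) hsp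
      · simpa using h
    obtain ⟨j, hj, hcj⟩ := List.getElem_of_mem hmem
    have hj26 : j < 26 := lt_of_lt_of_le hj (by simp [List.length_take])
    have hju : j < (pvUniq key.toList).length := by simp [List.length_take] at hj; omega
    have hcu : (pvUniq key.toList)[j] = c := by rw [← hcj, List.getElem_take]
    obtain ⟨i, hi, hrank⟩ := rank_eq key.toList c hsp j hju hcu
    simp only [beq_iff_eq, if_neg hsp]
    rw [← hcu, iKey_getD (pvUniq key.toList) (pvUniq_nodup _) j hju, alphas_getD j hj26, hcu,
      hi, Option.getD_some, PySem.List.slice_to_natCast, hrank]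
    rfl
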